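-- pv_equiv track=rewrite | github.com/ZelateCalcite/Small-Tools | 23_Python_programming_preparation/21.3.py | find
-- ===== SOURCE A (Python) =====
-- def find(n):
--     ans = []
--     for i in range(1, n + 1):
--         c_1, c_0 = 0, 0
--         t = i
--         while t > 0:
--             if t & 1:
--                 c_1 += 1
--             else:
--                 c_0 += 1
--             t >>= 1
--         if c_0 < c_1:
--             ans.append(i)
--     return ans
-- ===== SOURCE B (Python) =====
-- def find(n):
--     size = max(n, 0) + 1
--     pop = [0] * size
--     bl = [0] * size
--     ans = []
--     for i in range(1, n + 1):
--         p = pop[i // 2] + i % 2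
--         b = bl[i // 2] + 1
--         pop[i] = p
--         bl[i] = b
--         if 2 * p > b:
--             ans.append(i)
--     return ans
-- ===== Notes on version B (the rewrite author's own statement) =====
-- stated objective: faster
-- what changed: Replaces the per-number inner bit-counting while-loop with a linear dynamic programme that fills popcount and bit-length arrays from each value's half and tests in one pass whether the one-bits outnumber the zero-bits.
import Mathlib
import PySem

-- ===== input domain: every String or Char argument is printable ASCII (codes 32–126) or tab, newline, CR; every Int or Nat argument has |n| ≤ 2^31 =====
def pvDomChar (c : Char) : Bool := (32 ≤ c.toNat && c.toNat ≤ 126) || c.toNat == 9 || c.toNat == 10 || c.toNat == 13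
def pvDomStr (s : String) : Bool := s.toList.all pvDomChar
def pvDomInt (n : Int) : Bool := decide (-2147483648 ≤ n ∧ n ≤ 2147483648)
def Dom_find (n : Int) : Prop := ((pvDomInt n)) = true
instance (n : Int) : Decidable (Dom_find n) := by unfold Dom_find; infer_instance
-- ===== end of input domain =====

-- B replaces A's per-number inner bit-counting loop with a single-pass popcount/bit-length DP over arrays (objective: faster; measured).


-- ===== PORT A =====
-- A's inner 'while t > 0' loop, carrying (c_1, c_0)
def findBitLoop (t c1 c0 : Int) : Int × Int :=
  if h : 0 < t then
    if PySem.Int.band t 1 ≠ 0 then findBitLoop (PySem.Int.floordiv t 2) (c1 + 1) c0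
    else findBitLoop (PySem.Int.floordiv t 2) c1 (c0 + 1)
  else (c1, c0)
termination_by t.toNat
decreasing_by
  all_goals
    rw [PySem.Int.floordiv_eq_ediv_of_pos (by omega : (0:Int) < 2)]; omega

def find (n : Int) : List Int :=
  (PySem.List.pyRange 1 (n + 1) 1).foldl
    (fun ans i =>
      let r := findBitLoop i 0 0
      if r.2 < r.1 then ans ++ [i] else ans) []

-- ===== PORT B =====
-- body of B's single for-loop: state = (pop, bl, ans)
def findAltStep (st : List Int × List Int × List Int) (i : Int) : List Int × List Int × List Int :=
  let p := PySem.List.pyGetD st.1 (PySem.Int.floordiv i 2) 0 + PySem.Int.mod i 2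
  let b := PySem.List.pyGetD st.2.1 (PySem.Int.floordiv i 2) 0 + 1
  (PySem.List.pySetD st.1 i p, PySem.List.pySetD st.2.1 i b,
   if 2 * p > b then st.2.2 ++ [i] else st.2.2)

def find_alt (n : Int) : List Int :=
  ((PySem.List.pyRange 1 (n + 1) 1).foldl findAltStep
    (List.replicate (max n 0 + 1).toNat 0, List.replicate (max n 0 + 1).toNat 0, [])).2.2

-- ===== PRECONDITION & SPEC =====
def Spec_find (n : Int) (out : List Int) : Prop := out = find_alt n
instance (n : Int) (out : List Int) : Decidable (Spec_find n out) := by unfold Spec_find; infer_instance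

-- ===== CLAIM (what is proved, stated in full; the proofs are below) =====
def Claim_equal_find : Prop := ∀ (n : Int), Dom_find n → Spec_find n (find n)

-- ===== LEMMAS AND PROOFS =====

-- the predicate both programs compute: i has more 1-bits than 0-bits
def findCond (i : Int) : Bool := decide (PySem.Int.bitLength i < 2 * PySem.Int.bitCount i)

theorem findBitLoop_eq (k : Nat) :
    ∀ (t c1 c0 : Int), 0 ≤ t → t.toNat ≤ k →
      findBitLoop t c1 c0 =
        (c1 + (PySem.Int.bitCount t : Int),
         c0 + ((PySem.Int.bitLength t : Int) - (PySem.Int.bitCount t : Int))) := by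
  induction k with
  | zero =>
    intro t c1 c0 h0 hk
    have ht : t = 0 := by omega
    subst ht
    rw [findBitLoop]
    simp [PySem.Int.bitCount_zero, PySem.Int.bitLength_zero]
  | succ k ih =>
    intro t c1 c0 h0 hk
    by_cases hpos : 0 < t
    · have h2 : (0:Int) < 2 := by omega
      have hfd : PySem.Int.floordiv t 2 = t / 2 :=
        PySem.Int.floordiv_eq_ediv_of_pos h2
      have hfd0 : 0 ≤ PySem.Int.floordiv t 2 := by rw [hfd]; omega
      have hfdk : (PySem.Int.floordiv t 2).toNat ≤ k := by rw [hfd]; omega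
      have hmod : PySem.Int.mod t 2 = t % 2 := PySem.Int.mod_eq_emod_of_pos h2
      have hband : PySem.Int.band t 1 = PySem.Int.mod t 2 := PySem.Int.band_one t
      have hbc := PySem.Int.bitCount_of_pos hpos
      have hbl := PySem.Int.bitLength_of_pos hpos
      have hble := PySem.Int.bitCount_le_bitLength (PySem.Int.floordiv t 2)
      rw [findBitLoop]
      simp only [hpos, dif_pos, hband, hmod]
      by_cases hm : t % 2 = 0
      · simp only [hm, ne_eq, not_true_eq_false, if_false]
        rw [ih _ c1 (c0 + 1) hfd0 hfdk]
        rw [hbc, hbl, hmod, hm]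
        push_cast
        simp only [Prod.mk.injEq]; constructor <;> ring
      · have hm1 : t % 2 = 1 := by omega
        simp only [hm1, if_pos (by omega : (1:Int) ≠ 0)]
        rw [ih _ (c1 + 1) c0 hfd0 hfdk]
        rw [hbc, hbl, hmod, hm1]
        push_cast
        simp only [Prod.mk.injEq]; constructor <;> ring
    · have ht : t = 0 := by omega
      subst ht
      rw [findBitLoop]
      simp [PySem.Int.bitCount_zero, PySem.Int.bitLength_zero]

theorem find_eq_filter (n : Int) :
    find n = (PySem.List.pyRange 1 (n + 1) 1).filter findCond := by
  unfold find
  rw [PySem.List.foldl_congr_mem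
    (g := fun ans i => if findCond i then ans ++ [i] else ans)]
  · exact PySem.List.foldl_append_if_eq_filter _ _ _
  · intro acc x hx
    have hx1 : 1 ≤ x := (PySem.List.mem_pyRange_one.mp hx).1
    rw [findBitLoop_eq x.toNat x 0 0 (by omega) (le_refl _)]
    simp only [findCond]
    have := PySem.Int.bitCount_le_bitLength x
    by_cases h : PySem.Int.bitLength x < 2 * PySem.Int.bitCount x
    · rw [if_pos (by omega), if_pos (by simpa using h)]
    · rw [if_neg (by omega), if_neg (by simpa using h)]

theorem find_alt_inv (k : Nat) :
    ∀ (j n : Int) (pop bl ans : List Int), 1 ≤ j → (n + 1 - j).toNat ≤ k →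
      pop.length = (max n 0 + 1).toNat → bl.length = pop.length →
      (∀ u : Int, 0 ≤ u → u < j → PySem.List.pyGetD pop u 0 = (PySem.Int.bitCount u : Int)) →
      (∀ u : Int, 0 ≤ u → u < j → PySem.List.pyGetD bl u 0 = (PySem.Int.bitLength u : Int)) →
      ((PySem.List.pyRange j (n + 1) 1).foldl findAltStep (pop, bl, ans)).2.2 =
        ans ++ (PySem.List.pyRange j (n + 1) 1).filter findCond := by
  induction k with
  | zero =>
    intro j n pop bl ans hj hk _ _ _ _
    rw [PySem.List.pyRange_one_eq_nil (by omega)]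
    simp
  | succ k ih =>
    intro j n pop bl ans hj hk hplen hblen hpop hbl
    by_cases hend : n + 1 ≤ j
    · rw [PySem.List.pyRange_one_eq_nil hend]; simp
    · have hjn : j ≤ n := by omega
      have hn1 : 1 ≤ n := by omega
      have hmax : max n 0 = n := max_eq_left (by omega)
      have hLen : (pop.length : Int) = n + 1 := by rw [hplen, hmax]; omega
      have hBlen : (bl.length : Int) = n + 1 := by rw [hblen]; exact hLen
      have h2 : (0:Int) < 2 := by omega
      have hfd : PySem.Int.floordiv j 2 = j / 2 := PySem.Int.floordiv_eq_ediv_of_pos h2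
      have hfd0 : 0 ≤ PySem.Int.floordiv j 2 := by rw [hfd]; omega
      have hfdlt : PySem.Int.floordiv j 2 < j := by rw [hfd]; omega
      have hm0 : 0 ≤ PySem.Int.mod j 2 := PySem.Int.mod_nonneg j h2
      have hm2 : PySem.Int.mod j 2 < 2 := PySem.Int.mod_lt j h2
      have hbc := PySem.Int.bitCount_of_pos (show 0 < j by omega)
      have hblj := PySem.Int.bitLength_of_pos (show 0 < j by omega)
      have hp : PySem.List.pyGetD pop (PySem.Int.floordiv j 2) 0 + PySem.Int.mod j 2
          = (PySem.Int.bitCount j : Int) := by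
        rw [hpop _ hfd0 hfdlt, hbc]; push_cast; omega
      have hb : PySem.List.pyGetD bl (PySem.Int.floordiv j 2) 0 + 1
          = (PySem.Int.bitLength j : Int) := by
        rw [hbl _ hfd0 hfdlt, hblj]; push_cast; omega
      have hpop' : ∀ u : Int, 0 ≤ u → u < j + 1 →
          PySem.List.pyGetD (PySem.List.pySetD pop j (PySem.Int.bitCount j : Int)) u 0
            = (PySem.Int.bitCount u : Int) := by
        intro u hu0 hu
        rw [PySem.List.pySetD_of_nonneg _ _ (by omega : (0:Int) ≤ j)]
        rw [PySem.List.pyGetD_eq_getElem _ _ hu0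
          (by rw [List.length_set]; omega)]
        rw [List.getElem_set]
        by_cases huj : u = j
        · rw [if_pos (by omega)]; rw [huj]
        · have hult : u < j := by omega
          rw [if_neg (by omega)]
          rw [← PySem.List.pyGetD_eq_getElem _ _ hu0 (by omega)]
          exact hpop u hu0 hult
      have hbl' : ∀ u : Int, 0 ≤ u → u < j + 1 →
          PySem.List.pyGetD (PySem.List.pySetD bl j (PySem.Int.bitLength j : Int)) u 0
            = (PySem.Int.bitLength u : Int) := by
        intro u hu0 hu
        rw [PySem.List.pySetD_of_nonneg _ _ (by omega : (0:Int) ≤ j)]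
        rw [PySem.List.pyGetD_eq_getElem _ _ hu0
          (by rw [List.length_set]; omega)]
        rw [List.getElem_set]
        by_cases huj : u = j
        · rw [if_pos (by omega)]; rw [huj]
        · have hult : u < j := by omega
          rw [if_neg (by omega)]
          rw [← PySem.List.pyGetD_eq_getElem _ _ hu0 (by omega)]
          exact hbl u hu0 hult
      have hstep : findAltStep (pop, bl, ans) j =
          (PySem.List.pySetD pop j (PySem.Int.bitCount j : Int),
           PySem.List.pySetD bl j (PySem.Int.bitLength j : Int),
           if findCond j then ans ++ [j] else ans) := by
        unfold findAltStep
        simp only [hp, hb]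
        congr 2
        have := PySem.Int.bitCount_le_bitLength j
        by_cases hc : findCond j = true
        · simp only [findCond, decide_eq_true_eq] at hc
          rw [if_pos (by omega), if_pos (by simp [findCond]; omega)]
        · simp only [findCond, decide_eq_true_eq] at hc
          rw [if_neg (by omega), if_neg (by simp [findCond]; omega)]
      rw [PySem.List.pyRange_one_cons (by omega), List.foldl_cons, hstep]
      rw [ih (j + 1) n _ _ _ (by omega) (by omega)
        (by rw [PySem.List.pySetD_of_nonneg _ _ (by omega : (0:Int) ≤ j), List.length_set]; exact hplen)
        (by rw [PySem.List.pySetD_of_nonneg _ _ (by omega : (0:Int) ≤ j), List.length_set,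
                PySem.List.pySetD_of_nonneg _ _ (by omega : (0:Int) ≤ j), List.length_set]; exact hblen)
        hpop' hbl']
      rw [List.filter_cons]
      by_cases hc : findCond j = true
      · rw [if_pos hc, if_pos hc]; simp
      · rw [if_neg (by simpa using hc), if_neg (by simpa using hc)]

theorem find_alt_eq_filter (n : Int) :
    find_alt n = (PySem.List.pyRange 1 (n + 1) 1).filter findCond := by
  have hsz : (max n 0 + 1).toNat = (max n 0).toNat + 1 := by omega
  have hinit : ∀ u : Int, 0 ≤ u → u < 1 →
      PySem.List.pyGetD (List.replicate (max n 0 + 1).toNat (0:Int)) u 0 = 0 := by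
    intro u hu0 hu
    have hu' : u = 0 := by omega
    subst hu'
    rw [PySem.List.pyGetD_zero, hsz, List.replicate_succ]
    rfl
  unfold find_alt
  rw [find_alt_inv n.toNat 1 n _ _ [] (by omega) (by omega)
    (by simp) (by simp)
    (by intro u hu0 hu
        rw [hinit u hu0 hu]
        have : u = 0 := by omega
        subst this
        simp [PySem.Int.bitCount_zero])
    (by intro u hu0 hu
        rw [hinit u hu0 hu]
        have : u = 0 := by omega
        subst this
        simp [PySem.Int.bitLength_zero])]
  simp

-- ===== VERDICT (by name: the statement is the Claim_ definition above) =====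
theorem find_spec : Claim_equal_find := by
  intro n _
  unfold Spec_find
  rw [find_eq_filter, find_alt_eq_filter]
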